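-- pv_equiv track=rewrite | github.com/powy-e/FP_Prado | main.py | ordenar_posicoes
-- ===== SOURCE A (Python) =====
-- def obter_pos_x(pos):
--     """
--     obter_pos_x: posicao -> int
--     retorna a componente x da posicao
--     """
--     return pos[0]
--
-- def obter_pos_y(pos):
--     """
--     obter_pos_y: posicao -> int
--     retorna a componente y da posicao
--     """
--     return pos[1]
--
-- def ordenar_posicoes(tup):
--     """
--     ordenar_posicoes: tuplo -> tuplo
--     retorna o tuplo original ordenado
--     """
--     lst = list(tup)
--     for i in range(len(lst) - 1):
--         min_index = i
--         for j in range(i + 1, len(lst)):  # procura o menor elemento da lista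
--             if obter_pos_y(lst[j]) < obter_pos_y(lst[min_index]):
--                 min_index = j
--             elif obter_pos_y(lst[j]) == obter_pos_y(lst[min_index]):
--                 if obter_pos_x(lst[j]) < obter_pos_x(lst[min_index]):
--                     min_index = j
--         lst[i], lst[min_index] = lst[min_index], lst[i]
--     return tuple(lst)
-- ===== SOURCE B (Python) =====
-- def _merge(a, b):
--     out = []
--     i = j = 0
--     while i < len(a) and j < len(b):
--         if (a[i][1], a[i][0]) <= (b[j][1], b[j][0]):
--             out.append(a[i]); i += 1
--         else:
--             out.append(b[j]); j += 1
--     out.extend(a[i:])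
--     out.extend(b[j:])
--     return out
--
-- def _msort(lst):
--     if len(lst) <= 1:
--         return lst
--     mid = len(lst) // 2
--     return _merge(_msort(lst[:mid]), _msort(lst[mid:]))
--
-- def ordenar_posicoes(tup):
--     return tuple(_msort(list(tup)))
-- ===== Notes on version B (the rewrite author's own statement) =====
-- stated objective: faster
-- what changed: Replaced A's in-place selection sort (nested index scans picking the minimal (y, x) element and swapping) with a recursive top-down merge sort: split at the midpoint, sort each half, and merge with a single linear comparison pass on the (y, x) key.
import Mathlib
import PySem

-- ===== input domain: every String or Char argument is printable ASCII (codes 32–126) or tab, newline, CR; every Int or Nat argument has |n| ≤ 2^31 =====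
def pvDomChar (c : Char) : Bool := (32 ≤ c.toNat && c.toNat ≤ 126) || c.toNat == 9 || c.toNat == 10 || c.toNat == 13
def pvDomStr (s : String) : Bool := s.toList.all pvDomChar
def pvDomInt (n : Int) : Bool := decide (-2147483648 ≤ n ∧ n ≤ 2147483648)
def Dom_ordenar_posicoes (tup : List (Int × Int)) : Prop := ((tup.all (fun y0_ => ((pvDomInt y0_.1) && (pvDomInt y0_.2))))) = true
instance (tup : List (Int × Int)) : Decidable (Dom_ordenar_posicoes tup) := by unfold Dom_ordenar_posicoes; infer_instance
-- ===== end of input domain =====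

-- B replaces A's quadratic selection sort by a recursive merge sort on the (y, x) key (objective: faster).


-- ===== PORT A =====
-- Selection sort, step for step: outer loop over range(len-1), inner scan for the
-- minimal (y, x) index, then the swap.  lst[k] with an always-in-range index is
-- ported as PySem.List.pyGetD (exact under Raise.InRange, which always holds here).
def ordenar_posicoes (tup : List (Int × Int)) : List (Int × Int) :=
  (PySem.List.pyRange 0 ((tup.length : Int) - 1) 1).foldl (fun lst i =>
    let min_index := (PySem.List.pyRange (i + 1) (lst.length : Int) 1).foldl
      (fun mi j =>
        if (PySem.List.pyGetD lst j ((0 : Int), (0 : Int))).2 < (PySem.List.pyGetD lst mi ((0 : Int), (0 : Int))).2 then j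
        else if (PySem.List.pyGetD lst j ((0 : Int), (0 : Int))).2 = (PySem.List.pyGetD lst mi ((0 : Int), (0 : Int))).2 then
          (if (PySem.List.pyGetD lst j ((0 : Int), (0 : Int))).1 < (PySem.List.pyGetD lst mi ((0 : Int), (0 : Int))).1 then j else mi)
        else mi) i
    -- lst[i], lst[min_index] = lst[min_index], lst[i]
    (lst.set i.toNat (PySem.List.pyGetD lst min_index ((0 : Int), (0 : Int)))).set min_index.toNat
      (PySem.List.pyGetD lst i ((0 : Int), (0 : Int)))) tup

-- ===== PORT B =====
-- _merge's two-pointer while loop, transcribed as the structural recursion on the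
-- two unread suffixes; the tuple comparison (a[i][1], a[i][0]) <= (b[j][1], b[j][0])
-- is written out lexicographically.
def pvMerge : List (Int × Int) → List (Int × Int) → List (Int × Int)
  | [], b => b
  | a, [] => a
  | x :: a, y :: b =>
    if x.2 < y.2 ∨ (x.2 = y.2 ∧ x.1 ≤ y.1) then x :: pvMerge a (y :: b)
    else y :: pvMerge (x :: a) b
termination_by a b => a.length + b.length

-- _msort: lst[:mid] / lst[mid:] with mid = len(lst)//2 are exactly take/drop at
-- l.length / 2 (PySem.List.slice_to_natCast / slice_from_natCast, PySem.Int.floordiv_natCast).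
def pvMsort (l : List (Int × Int)) : List (Int × Int) :=
  if _h : l.length ≤ 1 then l
  else pvMerge (pvMsort (l.take (l.length / 2))) (pvMsort (l.drop (l.length / 2)))
termination_by l.length
decreasing_by
  · simp only [List.length_take]; omega
  · simp only [List.length_drop]; omega

def ordenar_posicoes_alt (tup : List (Int × Int)) : List (Int × Int) :=
  pvMsort tup

-- ===== PRECONDITION & SPEC =====
def Spec_ordenar_posicoes (tup : List (Int × Int)) (out : List (Int × Int)) : Prop := out = ordenar_posicoes_alt tup
instance (tup : List (Int × Int)) (out : List (Int × Int)) : Decidable (Spec_ordenar_posicoes tup out) := by unfold Spec_ordenar_posicoes; infer_instance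

-- ===== CLAIM (what is proved, stated in full; the proofs are below) =====
def Claim_equal_ordenar_posicoes : Prop := ∀ (tup : List (Int × Int)), Dom_ordenar_posicoes tup → Spec_ordenar_posicoes tup (ordenar_posicoes tup)

-- ===== LEMMAS AND PROOFS =====

-- the sort key: nonstrict lexicographic order on (y, x)
def pvLe (x y : Int × Int) : Prop := x.2 < y.2 ∨ (x.2 = y.2 ∧ x.1 ≤ y.1)

lemma pvLe_antisymm {x y : Int × Int} (h1 : pvLe x y) (h2 : pvLe y x) : x = y := by
  unfold pvLe at h1 h2
  have : x.1 = y.1 ∧ x.2 = y.2 := by omega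
  exact Prod.ext this.1 this.2

lemma pvLe_trans {x y z : Int × Int} (h1 : pvLe x y) (h2 : pvLe y z) : pvLe x z := by
  unfold pvLe at *; omega

lemma pvLe_not {x y : Int × Int} (h : ¬ (x.2 < y.2 ∨ (x.2 = y.2 ∧ x.1 ≤ y.1))) : pvLe y x := by
  unfold pvLe; omega

-- ---- B side: merge sort is sorted and a permutation ----

lemma pvMerge_perm (a b : List (Int × Int)) : List.Perm (pvMerge a b) (a ++ b) := by
  fun_induction pvMerge a b with
  | case1 b => simp
  | case2 a => simp
  | case3 x a y b h ih =>
    exact (ih.cons x).trans (by simp)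
  | case4 x a y b h ih =>
    exact (ih.cons y).trans List.perm_middle.symm

lemma pvMerge_mem {a b : List (Int × Int)} {z : Int × Int} (h : z ∈ pvMerge a b) :
    z ∈ a ∨ z ∈ b := by
  have := (pvMerge_perm a b).mem_iff.mp h
  simpa using this

lemma pvMerge_sorted {a b : List (Int × Int)} (ha : a.Pairwise pvLe) (hb : b.Pairwise pvLe) :
    (pvMerge a b).Pairwise pvLe := by
  fun_induction pvMerge a b with
  | case1 b => exact hb
  | case2 a => simpa using ha
  | case3 x a y b h ih =>
    refine List.pairwise_cons.mpr ⟨?_, ih (List.pairwise_cons.mp ha).2 hb⟩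
    intro z hz
    rcases pvMerge_mem hz with hz | hz
    · exact (List.pairwise_cons.mp ha).1 z hz
    · rcases List.mem_cons.mp hz with rfl | hz
      · exact h
      · exact pvLe_trans h ((List.pairwise_cons.mp hb).1 z hz)
  | case4 x a y b h ih =>
    have hyx : pvLe y x := pvLe_not h
    refine List.pairwise_cons.mpr ⟨?_, ih ha (List.pairwise_cons.mp hb).2⟩
    intro z hz
    rcases pvMerge_mem hz with hz | hz
    · rcases List.mem_cons.mp hz with rfl | hz
      · exact hyx
      · exact pvLe_trans hyx ((List.pairwise_cons.mp ha).1 z hz)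
    · exact (List.pairwise_cons.mp hb).1 z hz

lemma pvMsort_perm (l : List (Int × Int)) : List.Perm (pvMsort l) l := by
  fun_induction pvMsort l with
  | case1 l h => exact List.Perm.refl l
  | case2 l h ih1 ih2 =>
    refine (pvMerge_perm _ _).trans ?_
    refine ((ih1.append ih2).trans ?_)
    simp

lemma pvMsort_sorted (l : List (Int × Int)) : (pvMsort l).Pairwise pvLe := by
  fun_induction pvMsort l with
  | case1 l h =>
    match l, h with
    | [], _ => exact List.Pairwise.nil
    | [x], _ => simp
  | case2 l h ih1 ih2 => exact pvMerge_sorted ih1 ih2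

-- ---- A side: selection sort is sorted and a permutation ----

def pvGet (l : List (Int × Int)) (k : Int) : Int × Int := PySem.List.pyGetD l k ((0 : Int), (0 : Int))
def pvSel (l : List (Int × Int)) (mi j : Int) : Int :=
  if (pvGet l j).2 < (pvGet l mi).2 then j
  else if (pvGet l j).2 = (pvGet l mi).2 then (if (pvGet l j).1 < (pvGet l mi).1 then j else mi)
  else mi

lemma pvSel_fold (l : List (Int × Int)) (i : Int) :
    ∀ (k : Nat) (c m : Int), (l.length : Int) - c = k → i ≤ m → m < c → c ≤ (l.length : Int) →
    (∀ j : Int, i ≤ j → j < c → pvLe (pvGet l m) (pvGet l j)) →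
    (i ≤ (PySem.List.pyRange c (l.length : Int) 1).foldl (pvSel l) m ∧
     (PySem.List.pyRange c (l.length : Int) 1).foldl (pvSel l) m < (l.length : Int) ∧
     ∀ j : Int, i ≤ j → j < (l.length : Int) →
       pvLe (pvGet l ((PySem.List.pyRange c (l.length : Int) 1).foldl (pvSel l) m)) (pvGet l j)) := by
  intro k
  induction k with
  | zero =>
    intro c m hk hm1 hm2 hc hmin
    have hc' : (l.length : Int) ≤ c := by omega
    rw [PySem.List.pyRange_one_eq_nil hc']
    simp only [List.foldl_nil]
    exact ⟨hm1, by omega, fun j h1 h2 => hmin j h1 (by omega)⟩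
  | succ k ih =>
    intro c m hk hm1 hm2 hc hmin
    have hclt : c < (l.length : Int) := by omega
    rw [PySem.List.pyRange_one_cons hclt]
    simp only [List.foldl_cons]
    have hsel : i ≤ pvSel l m c ∧ pvSel l m c < c + 1 ∧
        ∀ j : Int, i ≤ j → j < c + 1 → pvLe (pvGet l (pvSel l m c)) (pvGet l j) := by
      unfold pvSel
      split_ifs with h1 h2 h3
      · refine ⟨by omega, by omega, ?_⟩
        intro j hj1 hj2
        rcases lt_or_ge j c with hj | hj
        · exact Or.inl (by have := hmin j hj1 hj; unfold pvLe at *; omega)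
        · have : j = c := by omega
          subst this; exact Or.inr ⟨rfl, le_refl _⟩
      · refine ⟨by omega, by omega, ?_⟩
        intro j hj1 hj2
        rcases lt_or_ge j c with hj | hj
        · have := hmin j hj1 hj; unfold pvLe at *; omega
        · have : j = c := by omega
          subst this; exact Or.inr ⟨rfl, le_refl _⟩
      · refine ⟨by omega, by omega, ?_⟩
        intro j hj1 hj2
        rcases lt_or_ge j c with hj | hj
        · exact hmin j hj1 hj
        · have : j = c := by omega
          subst this; unfold pvLe; omega
      · refine ⟨by omega, by omega, ?_⟩
        intro j hj1 hj2
        rcases lt_or_ge j c with hj | hj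
        · exact hmin j hj1 hj
        · have : j = c := by omega
          subst this; unfold pvLe; omega
    exact ih (c + 1) (pvSel l m c) (by omega) hsel.1 hsel.2.1 (by omega) hsel.2.2

def pvStepA (lst : List (Int × Int)) (i : Int) : List (Int × Int) :=
  let min_index := (PySem.List.pyRange (i + 1) (lst.length : Int) 1).foldl (pvSel lst) i
  (lst.set i.toNat (pvGet lst min_index)).set min_index.toNat (pvGet lst i)

def pvInv (t l : List (Int × Int)) (i : Nat) : Prop :=
  List.Perm l t ∧ (l.take i).Pairwise pvLe ∧ ∀ x ∈ l.take i, ∀ y ∈ l.drop i, pvLe x y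

lemma getElem_mem_drop (l : List (Int × Int)) (i j : Nat) (hij : i ≤ j) (hj : j < l.length) :
    l[j] ∈ l.drop i := by
  have hk : j - i < (l.drop i).length := by simp; omega
  have : (l.drop i)[j - i] = l[j] := by
    rw [List.getElem_drop]
    congr 1; omega
  rw [← this]
  exact List.getElem_mem hk

lemma pvStepA_inv (t l : List (Int × Int)) (i : Nat) (hlen : i < l.length) (h : pvInv t l i) :
    pvInv t (pvStepA l (i : Int)) (i + 1) := by
  obtain ⟨hperm, hsort, hcross⟩ := h
  have hfold := pvSel_fold l (i : Int) (l.length - (i + 1)) ((i : Int) + 1) (i : Int)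
    (by omega) (le_refl _) (by omega) (by omega)
    (by intro j h1 h2
        have : j = (i : Int) := by omega
        subst this
        exact Or.inr ⟨rfl, le_refl _⟩)
  set m := (PySem.List.pyRange ((i : Int) + 1) (l.length : Int) 1).foldl (pvSel l) (i : Int) with hm
  obtain ⟨hm1, hm2, hmin⟩ := hfold
  set M := m.toNat with hM
  have hmM : m = (M : Int) := by omega
  have hMi : i ≤ M := by omega
  have hMl : M < l.length := by omega
  have hgm : pvGet l m = l[M] := by
    rw [hmM]
    simp only [pvGet, PySem.List.pyGetD_natCast]
    exact List.getD_eq_getElem l (0, 0) hMl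
  have hgi : pvGet l (i : Int) = l[i] := by
    simp only [pvGet, PySem.List.pyGetD_natCast]
    exact List.getD_eq_getElem l (0, 0) hlen
  have hminN : ∀ j : Nat, i ≤ j → (hj : j < l.length) → pvLe l[M] l[j] := by
    intro j h1 hj
    have hgj : pvGet l (j : Int) = l[j] := by
      simp only [pvGet, PySem.List.pyGetD_natCast]
      exact List.getD_eq_getElem l (0, 0) hj
    have := hmin (j : Int) (by omega) (by omega)
    rwa [hgm, hgj] at this
  have hstep : pvStepA l (i : Int) = (l.set i l[M]).set M l[i] := by
    show (l.set (i : Int).toNat (pvGet l m)).set m.toNat (pvGet l (i : Int)) = _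
    rw [hgm, hgi]
    simp [← hM]
  unfold pvInv
  rw [hstep]
  set l' := (l.set i l[M]).set M l[i] with hl'
  have hlen' : l'.length = l.length := by simp [hl']
  have hget : ∀ (k : Nat) (hk : k < l.length),
      l'[k]'(by omega) = if M = k then l[i] else if i = k then l[M] else l[k] := by
    intro k hk
    simp [hl', List.getElem_set]
  have hF1 : List.Perm l' l := by rw [hl']; exact List.set_set_perm hlen hMl
  have htake : l'.take (i + 1) = l.take i ++ [l[M]] := by
    apply List.ext_getElem
    · simp; omega
    · intro k hk1 hk2
      rw [List.getElem_take]
      have hki : k < i + 1 := by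
        rw [List.length_take, hlen'] at hk1; omega
      have hkl : k < l.length := by omega
      rw [hget k hkl]
      rcases Nat.lt_or_ge k i with hk | hk
      · rw [List.getElem_append_left (by rw [List.length_take]; omega)]
        rw [List.getElem_take]
        rw [if_neg (by omega), if_neg (by omega)]
      · have hki' : k = i := by omega
        subst hki'
        rw [List.getElem_append_right (by rw [List.length_take]; omega)]
        by_cases hMk : M = k
        · rw [if_pos hMk]
          simp [hMk]
        · rw [if_neg hMk, if_pos rfl]
          simp
  have hdropmem : ∀ y ∈ l'.drop (i + 1), ∃ j : Nat, ∃ hj : j < l.length, i ≤ j ∧ y = l[j] := by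
    intro y hy
    obtain ⟨k, hk, hky⟩ := List.mem_iff_getElem.mp hy
    have hk2 : i + 1 + k < l.length := by
      rw [List.length_drop, hlen'] at hk; omega
    have he : (l'.drop (i + 1))[k]'hk = l'[i + 1 + k]'(by omega) := by
      rw [List.getElem_drop]
    rw [he, hget (i + 1 + k) hk2] at hky
    by_cases hMk : M = i + 1 + k
    · rw [if_pos hMk] at hky
      exact ⟨i, by omega, le_refl _, hky.symm⟩
    · rw [if_neg hMk, if_neg (by omega)] at hky
      exact ⟨i + 1 + k, hk2, by omega, hky.symm⟩
  have hMdrop : l[M] ∈ l.drop i := getElem_mem_drop l i M hMi hMl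
  refine ⟨hF1.trans hperm, ?_, ?_⟩
  · rw [htake, List.pairwise_append]
    refine ⟨hsort, by simp, ?_⟩
    intro a ha b hb
    rw [List.mem_singleton] at hb
    subst hb
    exact hcross a ha _ hMdrop
  · intro x hx y hy
    rw [htake] at hx
    obtain ⟨j, hj, hij, hyj⟩ := hdropmem y hy
    subst hyj
    rcases List.mem_append.mp hx with hx | hx
    · exact hcross x hx _ (getElem_mem_drop l i j hij hj)
    · rw [List.mem_singleton] at hx
      subst hx
      exact hminN j hij hj

lemma ordenar_eq_foldl (tup : List (Int × Int)) :
    ordenar_posicoes tup = (PySem.List.pyRange 0 ((tup.length : Int) - 1) 1).foldl pvStepA tup := rfl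

lemma pvFold_inv (t : List (Int × Int)) : ∀ (k i : Nat) (l : List (Int × Int)),
    pvInv t l i → i + k + 1 = t.length →
    pvInv t ((PySem.List.pyRange (i : Int) ((t.length : Int) - 1) 1).foldl pvStepA l) (t.length - 1) := by
  intro k
  induction k with
  | zero =>
    intro i l hinv hik
    rw [PySem.List.pyRange_one_eq_nil (by omega)]
    simpa [List.foldl_nil, (by omega : t.length - 1 = i)] using hinv
  | succ k ih =>
    intro i l hinv hik
    rw [PySem.List.pyRange_one_cons (by omega)]
    simp only [List.foldl_cons]
    have hlen : i < l.length := by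
      rw [hinv.1.length_eq]; omega
    have h1 := pvStepA_inv t l i hlen hinv
    have := ih (i + 1) (pvStepA l (i : Int)) h1 (by omega)
    simpa [Nat.cast_add, Nat.cast_one] using this

lemma pairwise_short {R : Int × Int → Int × Int → Prop} (l : List (Int × Int)) (h : l.length ≤ 1) :
    l.Pairwise R := by
  match l, h with
  | [], _ => exact List.Pairwise.nil
  | [x], _ => simp

lemma sorted_of_inv (t l : List (Int × Int)) (h : pvInv t l (t.length - 1)) : l.Pairwise pvLe := by
  obtain ⟨hperm, hsort, hcross⟩ := h
  have hlen : l.length = t.length := hperm.length_eq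
  have : l = l.take (t.length - 1) ++ l.drop (t.length - 1) := (List.take_append_drop _ _).symm
  rw [this, List.pairwise_append]
  exact ⟨hsort, pairwise_short _ (by simp; omega), hcross⟩

lemma selsort_inv (tup : List (Int × Int)) : pvInv tup (ordenar_posicoes tup) (tup.length - 1) := by
  rw [ordenar_eq_foldl]
  rcases Nat.eq_zero_or_pos tup.length with h0 | hpos
  · rw [PySem.List.pyRange_one_eq_nil (by omega)]
    simp only [List.foldl_nil]
    exact ⟨List.Perm.refl tup, by simp [h0], by simp [h0]⟩
  · have := pvFold_inv tup (tup.length - 1) 0 tup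
      ⟨List.Perm.refl tup, by simp, by simp⟩ (by omega)
    simpa using this

lemma selsort_perm (tup : List (Int × Int)) : List.Perm (ordenar_posicoes tup) tup :=
  (selsort_inv tup).1

lemma selsort_sorted (tup : List (Int × Int)) : (ordenar_posicoes tup).Pairwise pvLe :=
  sorted_of_inv tup _ (selsort_inv tup)

-- ===== VERDICT (by name: the statement is the Claim_ definition above) =====
theorem ordenar_posicoes_spec : Claim_equal_ordenar_posicoes := by
  intro tup _
  unfold Spec_ordenar_posicoes ordenar_posicoes_alt
  exact List.Perm.eq_of_pairwise (fun _ _ _ _ h1 h2 => pvLe_antisymm h1 h2)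
    (selsort_sorted tup) (pvMsort_sorted tup) ((selsort_perm tup).trans (pvMsort_perm tup).symm)
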